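-- pv_equiv track=rewrite | github.com/KelvinHelmut/Grupo-Estudio-Python | Unidad 4/Desafios/Sem4Des3+aek6.py | getElementoLista
-- ===== SOURCE A (Python) =====
-- def getElementoLista( lista, indice ):
--     '''me retorna el elemento con indice x de mi lista'''
--     c = 0
--     elemento = ''
--     for i in lista:
--         if i == ',':
--             if c == indice:
--                 return elemento
--             elemento = ''
--             c += 1
--         else:
--             elemento += i
--
--     if c == indice:
--         return elemento
--     return ''
-- ===== SOURCE B (Python) =====
-- def getElementoLista(lista, indice):
--     '''me retorna el elemento con indice x de mi lista'''
--     partes = lista.split(',')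
--     if 0 <= indice < len(partes):
--         return partes[indice]
--     return ''
-- ===== Notes on version B (the rewrite author's own statement) =====
-- stated objective: idiomatic
-- what changed: Replaces the char-by-char scan with a running comma counter and accumulator by materializing the fields with str.split(',') and returning the bounds-checked indexed field.
import Mathlib
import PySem

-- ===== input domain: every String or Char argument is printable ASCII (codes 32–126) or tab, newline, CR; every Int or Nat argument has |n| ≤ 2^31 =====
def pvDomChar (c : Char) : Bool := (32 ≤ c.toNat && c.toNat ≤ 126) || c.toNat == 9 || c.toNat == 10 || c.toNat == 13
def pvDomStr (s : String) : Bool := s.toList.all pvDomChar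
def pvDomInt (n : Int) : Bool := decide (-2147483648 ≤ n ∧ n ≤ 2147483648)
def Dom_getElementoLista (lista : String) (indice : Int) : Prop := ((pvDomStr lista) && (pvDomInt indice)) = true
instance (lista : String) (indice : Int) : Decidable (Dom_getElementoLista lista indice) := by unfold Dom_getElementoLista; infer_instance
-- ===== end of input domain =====

-- B replaces A's char-by-char scan with a comma counter by splitting on ',' and bounds-checked indexing (idiomatic).


-- ===== PORT A =====
-- the for-loop over the characters, with comma counter c and accumulator elemento
def getElementoListaGo (indice : Int) : Int → List Char → List Char → String
  | c, elem, [] => if c = indice then String.ofList elem else ""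
  | c, elem, i :: rest =>
    if i = ',' then
      if c = indice then String.ofList elem
      else getElementoListaGo indice (c + 1) [] rest
    else getElementoListaGo indice c (elem ++ [i]) rest

def getElementoLista (lista : String) (indice : Int) : String :=
  getElementoListaGo indice 0 [] lista.toList

-- ===== PORT B =====
-- partes = lista.split(','); return partes[indice] if 0 <= indice < len(partes) else ''
def getElementoLista_alt (lista : String) (indice : Int) : String :=
  let partes := PySem.Chars.splitOn lista.toList [',']
  if 0 ≤ indice ∧ indice < partes.length then String.ofList (partes.getD indice.toNat []) else ""

-- ===== PRECONDITION & SPEC =====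
def Spec_getElementoLista (lista : String) (indice : Int) (out : String) : Prop := out = getElementoLista_alt lista indice
instance (lista : String) (indice : Int) (out : String) : Decidable (Spec_getElementoLista lista indice out) := by unfold Spec_getElementoLista; infer_instance

-- ===== CLAIM (what is proved, stated in full; the proofs are below) =====
def Claim_equal_getElementoLista : Prop := ∀ (lista : String) (indice : Int), Dom_getElementoLista lista indice → Spec_getElementoLista lista indice (getElementoLista lista indice)

-- ===== LEMMAS AND PROOFS =====

-- the list of comma-separated fields of l, with pre the already-read part of the first field
def pvFields : List Char → List Char → List (List Char)
  | pre, [] => [pre]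
  | pre, c :: rest => if c = ',' then pre :: pvFields [] rest else pvFields (pre ++ [c]) rest

theorem splitOn_go_comma (fuel : Nat) : ∀ (l cur : List Char) (acc : List (List Char)),
    l.length < fuel →
    PySem.Chars.splitOn.go [','] fuel l cur acc = acc.reverse ++ pvFields cur.reverse l := by
  induction fuel with
  | zero => intro l cur acc h; omega
  | succ fuel ih =>
    intro l cur acc h
    cases l with
    | nil => simp [PySem.Chars.splitOn.go, pvFields]
    | cons c rest =>
      by_cases hc : c = ','
      · subst hc
        rw [PySem.Chars.splitOn.go]
        simp only [List.isPrefixOf, List.length_cons, List.drop_succ_cons, List.length_nil,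
          List.drop_zero, beq_self_eq_true, Bool.and_true, if_true]
        rw [ih rest [] (cur.reverse :: acc) (by simp at h; omega)]
        simp [pvFields]
      · rw [PySem.Chars.splitOn.go]
        have : ([','].isPrefixOf (c :: rest)) = false := by
          simp [List.isPrefixOf]; exact fun hh => hc (hh ▸ rfl)
        rw [this]
        simp only [if_neg Bool.false_ne_true]
        rw [ih rest (c :: cur) acc (by simp at h; omega)]
        simp [pvFields, hc]

theorem splitOn_comma (s : List Char) :
    PySem.Chars.splitOn s [','] = pvFields [] s := by
  have := splitOn_go_comma (s.length + 1) s [] [] (by omega)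
  simpa [PySem.Chars.splitOn] using this

theorem goA_char (l : List Char) : ∀ (indice c : Int) (elem : List Char),
    getElementoListaGo indice c elem l =
      if c ≤ indice ∧ indice - c < (pvFields elem l).length then
        String.ofList ((pvFields elem l).getD (indice - c).toNat []) else "" := by
  induction l with
  | nil =>
    intro indice c elem
    by_cases h : c = indice
    · subst h; simp [getElementoListaGo, pvFields]
    · rw [show getElementoListaGo indice c elem [] = if c = indice then String.ofList elem else "" from rfl]
      rw [if_neg h, if_neg (by simp [pvFields]; omega)]
  | cons i rest ih =>
    intro indice c elem
    by_cases hi : i = ','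
    · subst hi
      rw [show getElementoListaGo indice c elem (',' :: rest)
            = if c = indice then String.ofList elem
              else getElementoListaGo indice (c + 1) [] rest from rfl]
      have hpv : pvFields elem (',' :: rest) = elem :: pvFields [] rest := by
        simp [pvFields]
      rw [hpv]
      by_cases h : c = indice
      · subst h
        rw [if_pos rfl, if_pos (by simp)]
        simp
      · rw [if_neg h, ih indice (c + 1) []]
        by_cases hle : c + 1 ≤ indice ∧ indice - (c + 1) < (pvFields [] rest).length
        · rw [if_pos hle, if_pos (by simp; omega)]
          have hn : (indice - c).toNat = (indice - (c + 1)).toNat + 1 := by omega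
          rw [hn, List.getD_cons_succ]
        · rw [if_neg hle, if_neg (by simp; omega)]
    · rw [show getElementoListaGo indice c elem (i :: rest)
            = if i = ',' then (if c = indice then String.ofList elem
                else getElementoListaGo indice (c + 1) [] rest)
              else getElementoListaGo indice c (elem ++ [i]) rest from rfl]
      rw [if_neg hi, ih indice c (elem ++ [i])]
      simp [pvFields, hi]

-- ===== VERDICT (by name: the statement is the Claim_ definition above) =====
theorem getElementoLista_spec : Claim_equal_getElementoLista := by
  intro lista indice _
  unfold Spec_getElementoLista getElementoLista getElementoLista_alt
  rw [splitOn_comma, goA_char]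
  simp
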